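-- pv_equiv track=rewrite | github.com/tiendm1991/python | leetcode/bicontest/bcontest-043/bContest2.py | maximumGain
-- ===== SOURCE A (Python) =====
-- def maximumGain(s: str, x: int, y: int) -> int:
--     if x < y:
--         s = s.replace('a', '#').replace('b', 'a').replace('#', 'b')
--         x, y = y, x
--
--     def caculateRemain(a):
--         ans = 0
--         stk = []
--         for i, c in enumerate(a):
--             if c == 'a' and stk and stk[-1] == 'b':
--                 stk.pop()
--                 ans += y
--             else:
--                 stk.append(c)
--         return ans
--
--     res = 0
--     stack = []
--     for i, c in enumerate(s):
--         if c == 'b':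
--             if stack and stack[-1] == 'a':
--                 stack.pop()
--                 res += x
--             else:
--                 stack.append(c)
--         elif c == 'a':
--             stack.append(c)
--         else:
--             res += caculateRemain(stack)
--             stack = []
--     res += caculateRemain(stack)
--     return res
-- ===== SOURCE B (Python) =====
-- def maximumGain(s: str, x: int, y: int) -> int:
--     # Same relabel trick as the original so the high-value pair is always 'ab';
--     # then a single pass with two integer counters per segment instead of stacks.
--     if x < y:
--         s = s.replace('a', '#').replace('b', 'a').replace('#', 'b')
--         x, y = y, x
--     total = 0
--     a_cnt = 0
--     b_left = 0
--     for c in s: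
--         if c == 'a':
--             a_cnt += 1
--         elif c == 'b':
--             if a_cnt > 0:
--                 a_cnt -= 1
--                 total += x
--             else:
--                 b_left += 1
--         else:
--             total += y * min(a_cnt, b_left)
--             a_cnt = 0
--             b_left = 0
--     total += y * min(a_cnt, b_left)
--     return total
-- ===== Notes on version B (the rewrite author's own statement) =====
-- stated objective: simpler
-- what changed: Replaces A's two explicit stacks and the per-segment rescanning helper caculateRemain with a single pass keeping two integer counters (unmatched a's and leftover b's) per segment, closing each segment with the closed form y*min(a_cnt, b_left).
import Mathlib
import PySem

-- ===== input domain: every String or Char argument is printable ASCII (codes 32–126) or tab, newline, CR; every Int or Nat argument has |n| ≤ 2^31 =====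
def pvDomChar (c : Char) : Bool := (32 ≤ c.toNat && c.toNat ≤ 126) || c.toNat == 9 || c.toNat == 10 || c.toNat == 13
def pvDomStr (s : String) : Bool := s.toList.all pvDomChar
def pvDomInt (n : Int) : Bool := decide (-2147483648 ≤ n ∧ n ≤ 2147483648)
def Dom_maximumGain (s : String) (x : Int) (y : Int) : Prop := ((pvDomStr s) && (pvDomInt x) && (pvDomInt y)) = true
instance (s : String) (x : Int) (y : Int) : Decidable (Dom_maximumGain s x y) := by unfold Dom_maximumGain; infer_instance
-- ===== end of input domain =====

-- B replaces A's two explicit stacks (and the per-segment rescan helper) by two integer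
-- counters per segment with a closed-form y*min(a,b) at each boundary (objective: simpler).


-- ===== PORT A =====
-- body of the inner loop of caculateRemain (stk[-1] via PySem.List.pyGet?)
def remStep (y : Int) (st : Int × List Char) (c : Char) : Int × List Char :=
  if c = 'a' ∧ st.2 ≠ [] ∧ PySem.List.pyGet? st.2 (-1) = some 'b' then
    (st.1 + y, st.2.dropLast)
  else
    (st.1, st.2 ++ [c])

def caculateRemain (y : Int) (a : List Char) : Int :=
  (a.foldl (remStep y) (0, [])).1

-- body of the main loop
def mainStep (x y : Int) (st : Int × List Char) (c : Char) : Int × List Char :=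
  if c = 'b' then
    if st.2 ≠ [] ∧ PySem.List.pyGet? st.2 (-1) = some 'a' then
      (st.1 + x, st.2.dropLast)
    else
      (st.1, st.2 ++ [c])
  else if c = 'a' then
    (st.1, st.2 ++ [c])
  else
    (st.1 + caculateRemain y st.2, [])

def maximumGain (s : String) (x : Int) (y : Int) : Int :=
  let sxy :=
    if x < y then
      (PySem.Str.replace (PySem.Str.replace (PySem.Str.replace s "a" "#") "b" "a") "#" "b", y, x)
    else (s, x, y)
  let st := sxy.1.toList.foldl (mainStep sxy.2.1 sxy.2.2) (0, [])
  st.1 + caculateRemain sxy.2.2 st.2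

-- ===== PORT B =====
-- body of B's single counter pass: state (total, a_cnt, b_left)
def altStep (x y : Int) (st : Int × Int × Int) (c : Char) : Int × Int × Int :=
  if c = 'a' then (st.1, st.2.1 + 1, st.2.2)
  else if c = 'b' then
    if st.2.1 > 0 then (st.1 + x, st.2.1 - 1, st.2.2)
    else (st.1, st.2.1, st.2.2 + 1)
  else (st.1 + y * min st.2.1 st.2.2, 0, 0)

def maximumGain_alt (s : String) (x : Int) (y : Int) : Int :=
  let sxy :=
    if x < y then
      (PySem.Str.replace (PySem.Str.replace (PySem.Str.replace s "a" "#") "b" "a") "#" "b", y, x)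
    else (s, x, y)
  let st := sxy.1.toList.foldl (altStep sxy.2.1 sxy.2.2) (0, 0, 0)
  st.1 + sxy.2.2 * min st.2.1 st.2.2

-- ===== PRECONDITION & SPEC =====
def Spec_maximumGain (s : String) (x : Int) (y : Int) (out : Int) : Prop := out = maximumGain_alt s x y
instance (s : String) (x : Int) (y : Int) (out : Int) : Decidable (Spec_maximumGain s x y out) := by unfold Spec_maximumGain; infer_instance

-- ===== CLAIM (what is proved, stated in full; the proofs are below) =====
def Claim_equal_maximumGain : Prop := ∀ (s : String) (x : Int) (y : Int), Dom_maximumGain s x y → Spec_maximumGain s x y (maximumGain s x y)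

-- ===== LEMMAS AND PROOFS =====

-- snoc views of the b^j ++ a^t stack shape
lemma repa_snoc (j t : Nat) : List.replicate j 'b' ++ List.replicate (t + 1) 'a'
    = (List.replicate j 'b' ++ List.replicate t 'a') ++ ['a'] := by
  rw [List.replicate_succ' (n := t), List.append_assoc]

lemma pyGet_last2 (xs ys : List Char) (c : Char) :
    PySem.List.pyGet? (xs ++ (ys ++ [c])) (-1) = some c := by
  rw [← List.append_assoc]; exact PySem.List.pyGet?_neg_one_append_singleton _ _

lemma repb_snoc (j : Nat) : List.replicate (j + 1) 'b' ++ List.replicate 0 'a'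
    = (List.replicate j 'b' ++ List.replicate 0 'a') ++ ['b'] := by
  simp [List.replicate_succ' (n := j)]

-- remStep over a run of 'a's starting from a b^j ++ a^t stack
lemma remStep_on_as (y : Int) (m : Nat) : ∀ (ans : Int) (j t : Nat),
    (List.foldl (remStep y) (ans, List.replicate j 'b' ++ List.replicate t 'a') (List.replicate m 'a'))
      = if t = 0 then
          (ans + y * (min j m : Nat), List.replicate (j - m) 'b' ++ List.replicate (m - j) 'a')
        else
          (ans, List.replicate j 'b' ++ List.replicate (t + m) 'a') := by
  induction m with
  | zero => intro ans j t; cases t <;> simp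
  | succ m ih =>
    intro ans j t
    rw [List.replicate_succ, List.foldl_cons]
    rcases Nat.eq_zero_or_pos t with ht | ht
    · subst ht
      rcases Nat.eq_zero_or_pos j with hj | hj
      · subst hj
        have hstep : remStep y (ans, List.replicate 0 'b' ++ List.replicate 0 'a') 'a'
            = (ans, List.replicate 0 'b' ++ List.replicate 1 'a') := by
          simp [remStep]
        rw [hstep, ih ans 0 1]
        simp [Nat.add_comm]
      · obtain ⟨j', rfl⟩ : ∃ j', j = j' + 1 := ⟨j - 1, by omega⟩
        have hstep : remStep y (ans, List.replicate (j' + 1) 'b' ++ List.replicate 0 'a') 'a'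
            = (ans + y, List.replicate j' 'b' ++ List.replicate 0 'a') := by
          rw [repb_snoc]
          simp [remStep, PySem.List.pyGet?_neg_one_append_singleton]
        rw [hstep, ih (ans + y) j' 0]
        have h1 : j' - m = j' + 1 - (m + 1) := by omega
        have h2 : m - j' = m + 1 - (j' + 1) := by omega
        have h3 : ans + y + y * (min j' m : Nat) = ans + y * (min (j' + 1) (m + 1) : Nat) := by
          have hm : (min j' m : Nat) + 1 = (min (j' + 1) (m + 1) : Nat) := by omega
          push_cast [← hm]; ring
        simp only [if_true, h1, h2]
        rw [h3]
    · obtain ⟨t', rfl⟩ : ∃ t', t = t' + 1 := ⟨t - 1, by omega⟩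
      have hstep : remStep y (ans, List.replicate j 'b' ++ List.replicate (t' + 1) 'a') 'a'
          = (ans, List.replicate j 'b' ++ List.replicate (t' + 1 + 1) 'a') := by
        rw [repa_snoc j t']
        simp [remStep, pyGet_last2, List.replicate_succ', List.append_assoc]
      rw [hstep, ih ans j (t' + 1 + 1)]
      have h4 : t' + 1 + 1 + m = t' + 1 + (m + 1) := by omega
      simp [h4]

-- remStep over a run of 'b's just pushes them
lemma remStep_on_bs (y : Int) (k : Nat) :
    List.foldl (remStep y) (0, []) (List.replicate k 'b') = (0, List.replicate k 'b') := by
  induction k with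
  | zero => simp
  | succ k ih =>
    rw [List.replicate_succ' (n := k), List.foldl_append, ih]
    simp [remStep]

lemma caculateRemain_eval (y : Int) (k m : Nat) :
    caculateRemain y (List.replicate k 'b' ++ List.replicate m 'a') = y * (min k m : Nat) := by
  unfold caculateRemain
  rw [List.foldl_append, remStep_on_bs]
  have := remStep_on_as y m 0 k 0
  simp only [List.replicate_zero, List.append_nil] at this
  rw [this]
  simp

-- the two loops agree: A's stack is always b^b_left ++ a^a_cnt for B's counters
lemma loops_agree (x y : Int) (l : List Char) : ∀ (res : Int) (k m : Nat),
    ∃ (res' : Int) (k' m' : Nat),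
      List.foldl (mainStep x y) (res, List.replicate k 'b' ++ List.replicate m 'a') l
        = (res', List.replicate k' 'b' ++ List.replicate m' 'a') ∧
      List.foldl (altStep x y) (res, (m : Int), (k : Int)) l
        = (res', (m' : Int), (k' : Int)) := by
  induction l with
  | nil => intro res k m; exact ⟨res, k, m, rfl, rfl⟩
  | cons c l ih =>
    intro res k m
    rw [List.foldl_cons, List.foldl_cons]
    by_cases ha : c = 'a'
    · subst ha
      have h1 : mainStep x y (res, List.replicate k 'b' ++ List.replicate m 'a') 'a'
          = (res, List.replicate k 'b' ++ List.replicate (m + 1) 'a') := by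
        simp [mainStep, repa_snoc k m]
      have h2 : altStep x y (res, (m : Int), (k : Int)) 'a'
          = (res, ((m + 1 : Nat) : Int), (k : Int)) := by
        simp [altStep]
      rw [h1, h2]
      exact ih res k (m + 1)
    · by_cases hb : c = 'b'
      · subst hb
        rcases Nat.eq_zero_or_pos m with hm | hm
        · subst hm
          have h1 : mainStep x y (res, List.replicate k 'b' ++ List.replicate 0 'a') 'b'
              = (res, List.replicate (k + 1) 'b' ++ List.replicate 0 'a') := by
            rcases Nat.eq_zero_or_pos k with hk | hk
            · subst hk; simp [mainStep, List.replicate_succ]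
            · obtain ⟨k', rfl⟩ : ∃ k', k = k' + 1 := ⟨k - 1, by omega⟩
              rw [repb_snoc k', repb_snoc (k' + 1)]
              simp [mainStep, List.replicate_succ', List.append_assoc]
          have h2 : altStep x y (res, ((0 : Nat) : Int), (k : Int)) 'b'
              = (res, ((0 : Nat) : Int), ((k + 1 : Nat) : Int)) := by
            simp [altStep]
          rw [h1, h2]
          exact ih res (k + 1) 0
        · obtain ⟨m', rfl⟩ : ∃ m', m = m' + 1 := ⟨m - 1, by omega⟩
          have h1 : mainStep x y (res, List.replicate k 'b' ++ List.replicate (m' + 1) 'a') 'b'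
              = (res + x, List.replicate k 'b' ++ List.replicate m' 'a') := by
            rw [repa_snoc k m']
            simp [mainStep, pyGet_last2]
          have h2 : altStep x y (res, ((m' + 1 : Nat) : Int), (k : Int)) 'b'
              = (res + x, ((m' : Nat) : Int), (k : Int)) := by
            simp [altStep]
          rw [h1, h2]
          exact ih (res + x) k m'
      · have h1 : mainStep x y (res, List.replicate k 'b' ++ List.replicate m 'a') c
            = (res + y * (min k m : Nat), List.replicate 0 'b' ++ List.replicate 0 'a') := by
          simp [mainStep, hb, ha, caculateRemain_eval]
        have h2 : altStep x y (res, (m : Int), (k : Int)) c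
            = (res + y * (min k m : Nat), ((0 : Nat) : Int), ((0 : Nat) : Int)) := by
          have hmin : min (m : Int) (k : Int) = ((min k m : Nat) : Int) := by push_cast; omega
          simp [altStep, ha, hb, hmin]
        rw [h1, h2]
        exact ih (res + y * (min k m : Nat)) 0 0

-- the two passes over the same (already relabelled) string and weights agree
lemma core_eq (t : String) (x y : Int) :
    (t.toList.foldl (mainStep x y) (0, ([] : List Char))).1
      + caculateRemain y (t.toList.foldl (mainStep x y) (0, ([] : List Char))).2
    = (t.toList.foldl (altStep x y) ((0 : Int), (0 : Int), (0 : Int))).1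
      + y * min (t.toList.foldl (altStep x y) ((0 : Int), (0 : Int), (0 : Int))).2.1
                (t.toList.foldl (altStep x y) ((0 : Int), (0 : Int), (0 : Int))).2.2 := by
  obtain ⟨res', k', m', hA, hB⟩ := loops_agree x y t.toList 0 0 0
  simp only [List.replicate_zero, List.append_nil, Nat.cast_zero] at hA hB
  rw [hA, hB, caculateRemain_eval]
  have hmin : ((min k' m' : Nat) : Int) = min (m' : Int) (k' : Int) := by push_cast; omega
  rw [hmin]

-- ===== VERDICT (by name: the statement is the Claim_ definition above) =====
theorem maximumGain_spec : Claim_equal_maximumGain := by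
  intro s x y _
  show maximumGain s x y = maximumGain_alt s x y
  unfold maximumGain maximumGain_alt
  by_cases hxy : x < y
  · simp only [if_pos hxy]
    exact core_eq _ _ _
  · simp only [if_neg hxy]
    exact core_eq _ _ _
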